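-- pv_equiv track=rewrite | github.com/cirosantilli/project-euler-solutions | solvers/883.py | _count_hex_points_leq
-- ===== SOURCE A (Python) =====
-- def _count_hex_points_leq(B: int, cache: dict[int, int]) -> int:
--     """
--     Number of integer pairs (x,y) with x^2 + x*y + y^2 <= B.
--     Includes the origin.
--
--     Uses the identity:
--       N(B) = 1 + 6 * sum_{d=1..B} chi(d) * floor(B/d),
--     where chi is the nontrivial Dirichlet character mod 3:
--       chi(d)= 1 if d≡1 (mod3), -1 if d≡2 (mod3), 0 if d≡0 (mod3).
--
--     The sum is computed in O(sqrt(B)) blocks by grouping equal floor(B/d).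
--     """
--     if B <= 0:
--         return 1  # only the origin for B==0, and caller subtracts if needed
--     hit = cache.get(B)
--     if hit is not None:
--         return hit
--
--     # prefix sum of chi on 1..m:
--     # count of numbers ≡1 mod3 minus count ≡2 mod3
--     def chi_prefix(m: int) -> int:
--         return (m + 2) // 3 - (m + 1) // 3
--
--     total = 0
--     n = B
--     i = 1
--     while i <= n:
--         q = n // i
--         j = n // q
--         total += q * (chi_prefix(j) - chi_prefix(i - 1))
--         i = j + 1
--
--     res = 1 + 6 * total
--     cache[B] = res
--     return res
-- ===== SOURCE B (Python) =====
-- def _count_hex_points_leq(B: int, cache: dict[int, int]) -> int: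
--     # Same value as A: N(B) = 1 + 6 * sum_{d=1..B} chi(d)*floor(B/d), but computed by a
--     # symmetric sqrt split (d <= B//(s+1) summed directly, larger d grouped by quotient q <= s)
--     # instead of A's adaptive equal-quotient blocks.
--     if B <= 0:
--         return 1
--     hit = cache.get(B)
--     if hit is not None:
--         return hit
--
--     def X(m: int) -> int:
--         return (m + 2) // 3 - (m + 1) // 3
--
--     s = 0
--     while (s + 1) * (s + 1) <= B:
--         s += 1
--     m = B // (s + 1)
--     total = 0
--     for d in range(1, m + 1):
--         c = d % 3
--         total += (1 if c == 1 else -1 if c == 2 else 0) * (B // d)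
--     for q in range(1, s + 1):
--         total += q * (X(B // q) - X(B // (q + 1)))
--     res = 1 + 6 * total
--     cache[B] = res
--     return res
-- ===== Notes on version B (the rewrite author's own statement) =====
-- stated objective: alternative
-- what changed: Replaces A's adaptive equal-quotient block while-loop with a symmetric hyperbola split: small divisors d <= B//(isqrt(B)+1) are summed directly with chi(d)*(B//d), and the remaining divisors are grouped by their quotient q = 1..isqrt(B); same O(sqrt(B)) cost, same B<=0 guard and cache read/write.
import Mathlib
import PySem

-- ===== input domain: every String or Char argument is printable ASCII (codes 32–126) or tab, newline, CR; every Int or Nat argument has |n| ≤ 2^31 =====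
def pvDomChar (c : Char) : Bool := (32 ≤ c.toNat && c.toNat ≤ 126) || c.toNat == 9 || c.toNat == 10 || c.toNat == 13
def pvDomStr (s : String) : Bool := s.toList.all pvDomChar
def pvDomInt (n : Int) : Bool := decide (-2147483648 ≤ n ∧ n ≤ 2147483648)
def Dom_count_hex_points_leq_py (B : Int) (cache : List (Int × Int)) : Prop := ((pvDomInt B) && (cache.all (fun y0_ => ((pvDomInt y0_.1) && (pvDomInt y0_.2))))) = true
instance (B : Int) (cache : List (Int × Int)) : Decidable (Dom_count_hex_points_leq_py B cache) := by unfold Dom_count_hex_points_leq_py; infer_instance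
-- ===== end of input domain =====

-- B computes the same Dirichlet-character sum by a symmetric sqrt split (direct small-d sum
-- plus grouping by quotient q) instead of A's adaptive equal-quotient blocks; equivalence is
-- about the RETURN value (both Pythons additionally write cache[B] identically on a miss).


-- ===== PORT A =====
-- chi_prefix helper of A
def pvChiPrefix (m : Int) : Int :=
  PySem.Int.floordiv (m + 2) 3 - PySem.Int.floordiv (m + 1) 3

-- A's while-loop over equal-quotient blocks; fuel only makes the recursion total
-- (fuel (B+1).toNat always suffices: i strictly increases each iteration).
def pvLoopA (fuel : Nat) (n i total : Int) : Int :=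
  match fuel with
  | 0 => total
  | fuel + 1 =>
    if i ≤ n then
      let q := PySem.Int.floordiv n i
      let j := PySem.Int.floordiv n q
      pvLoopA fuel n (j + 1) (total + q * (pvChiPrefix j - pvChiPrefix (i - 1)))
    else total

def count_hex_points_leq_py (B : Int) (cache : List (Int × Int)) : Int :=
  if B ≤ 0 then 1
  else
    match (PySem.Dict.mk cache).get? B with
    | some hit => hit
    | none => 1 + 6 * pvLoopA (B + 1).toNat B 1 0

-- ===== PORT B =====
-- X helper of Source B (same formula as A's chi_prefix, kept separate per side)
def pvX (m : Int) : Int :=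
  PySem.Int.floordiv (m + 2) 3 - PySem.Int.floordiv (m + 1) 3

-- Source B's isqrt while-loop; fuel only makes the recursion total ((B+1).toNat suffices).
def pvSqLoop (fuel : Nat) (n s : Int) : Int :=
  match fuel with
  | 0 => s
  | fuel + 1 => if (s + 1) * (s + 1) ≤ n then pvSqLoop fuel n (s + 1) else s

def count_hex_points_leq_py_alt (B : Int) (cache : List (Int × Int)) : Int :=
  if B ≤ 0 then 1
  else
    match (PySem.Dict.mk cache).get? B with
    | some hit => hit
    | none =>
      let s := pvSqLoop (B + 1).toNat B 0
      let m := PySem.Int.floordiv B (s + 1)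
      let total1 := (PySem.List.pyRange 1 (m + 1) 1).foldl
        (fun acc d =>
          acc + (if PySem.Int.mod d 3 = 1 then (1 : Int)
                 else if PySem.Int.mod d 3 = 2 then -1 else 0) * PySem.Int.floordiv B d) 0
      let total := (PySem.List.pyRange 1 (s + 1) 1).foldl
        (fun acc q =>
          acc + q * (pvX (PySem.Int.floordiv B q) - pvX (PySem.Int.floordiv B (q + 1)))) total1
      1 + 6 * total

-- ===== PRECONDITION & SPEC =====
def Spec_count_hex_points_leq_py (B : Int) (cache : List (Int × Int)) (out : Int) : Prop := out = count_hex_points_leq_py_alt B cache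
instance (B : Int) (cache : List (Int × Int)) (out : Int) : Decidable (Spec_count_hex_points_leq_py B cache out) := by unfold Spec_count_hex_points_leq_py; infer_instance

-- ===== CLAIM (what is proved, stated in full; the proofs are below) =====
def Claim_equal_count_hex_points_leq_py : Prop := ∀ (B : Int) (cache : List (Int × Int)), Dom_count_hex_points_leq_py B cache → Spec_count_hex_points_leq_py B cache (count_hex_points_leq_py B cache)

-- ===== LEMMAS AND PROOFS =====

-- chi, its prefix sum, and the partial character sums S N a b = Σ_{d=a}^{b} chi(d)·⌊N/d⌋, on ℕ
def pvChiN (d : Nat) : Int := if d % 3 = 1 then 1 else if d % 3 = 2 then -1 else 0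
def pvXN (m : Nat) : Int := (((m + 2) / 3 : Nat) : Int) - (((m + 1) / 3 : Nat) : Int)
def pvSN (N a b : Nat) : Int := ∑ d ∈ Finset.Icc a b, pvChiN d * ((N / d : Nat) : Int)


theorem pvIccIco (x y : Nat) : Finset.Icc x y = Finset.Ico x (y + 1) := by
  ext z; simp

theorem pvChiPrefix_cast (m : Nat) : pvChiPrefix (m : Int) = pvXN m := by
  unfold pvChiPrefix pvXN
  rw [show ((m : Int) + 2) = ((m + 2 : Nat) : Int) by push_cast; ring,
    show ((m : Int) + 1) = ((m + 1 : Nat) : Int) by push_cast; ring,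
    show (3 : Int) = ((3 : Nat) : Int) from rfl,
    PySem.Int.floordiv_natCast, PySem.Int.floordiv_natCast]

theorem pvX_cast (m : Nat) : pvX (m : Int) = pvXN m := by
  unfold pvX pvXN
  rw [show ((m : Int) + 2) = ((m + 2 : Nat) : Int) by push_cast; ring,
    show ((m : Int) + 1) = ((m + 1 : Nat) : Int) by push_cast; ring,
    show (3 : Int) = ((3 : Nat) : Int) from rfl,
    PySem.Int.floordiv_natCast, PySem.Int.floordiv_natCast]

theorem pvXN_succ (m : Nat) : pvXN (m + 1) = pvXN m + pvChiN (m + 1) := by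
  simp only [pvXN, pvChiN]
  split_ifs with h1 h2 <;> push_cast <;> omega

theorem pvXN_eq_sum (m : Nat) : pvXN m = ∑ d ∈ Finset.Icc 1 m, pvChiN d := by
  induction m with
  | zero => simp [pvXN]
  | succ m ih =>
    rw [pvXN_succ, ih, Finset.sum_Icc_succ_top (by omega)]

theorem pvDivSwap (N d q : Nat) (hd : 1 ≤ d) (hq : 1 ≤ q) : d ≤ N / q ↔ q ≤ N / d := by
  rw [Nat.le_div_iff_mul_le hq, Nat.le_div_iff_mul_le hd, Nat.mul_comm]

theorem pvSN_split (N a c b : Nat) (hac : a ≤ c + 1) (hcb : c ≤ b) :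
    pvSN N a b = pvSN N a c + pvSN N (c + 1) b := by
  simp only [pvSN, pvIccIco]
  rw [Finset.sum_Ico_consecutive _ hac (by omega)]

theorem pvConstBlock (N a b q : Nat) (ha : 1 ≤ a) (hab : a - 1 ≤ b)
    (h : ∀ d, a ≤ d → d ≤ b → N / d = q) :
    pvSN N a b = (q : Int) * (pvXN b - pvXN (a - 1)) := by
  rcases Nat.lt_or_ge b a with hba | hba
  · have hb : b = a - 1 := by omega
    subst hb
    simp [pvSN, Finset.Icc_eq_empty_of_lt hba]
  · have hsum : pvSN N a b = (∑ d ∈ Finset.Icc a b, pvChiN d) * (q : Int) := by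
      rw [Finset.sum_mul]
      apply Finset.sum_congr rfl
      intro d hd
      simp only [Finset.mem_Icc] at hd
      rw [h d hd.1 hd.2, mul_comm]
    have hx : pvXN b - pvXN (a - 1) = ∑ d ∈ Finset.Icc a b, pvChiN d := by
      rw [pvXN_eq_sum, pvXN_eq_sum]
      simp only [pvIccIco]
      have ha1 : a - 1 + 1 = a := by omega
      rw [← Finset.sum_Ico_consecutive (fun d => pvChiN d) (show 1 ≤ a - 1 + 1 by omega)
        (show a - 1 + 1 ≤ b + 1 by omega), ha1]
      ring
    rw [hsum, hx]; ring

theorem pvLoopA_spec (N : Nat) :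
    ∀ (fuel i : Nat) (total : Int), 1 ≤ i → N + 1 - i ≤ fuel →
      pvLoopA fuel (N : Int) (i : Int) total = total + pvSN N i N := by
  intro fuel
  induction fuel with
  | zero =>
    intro i total hi hf
    have : N < i := by omega
    simp [pvLoopA, pvSN, Finset.Icc_eq_empty_of_lt this]
  | succ fuel ih =>
    intro i total hi hf
    rcases Nat.lt_or_ge N i with hNi | hNi
    · have hguard : ¬ ((i : Int) ≤ (N : Int)) := by exact_mod_cast Nat.not_le.mpr hNi
      simp [pvLoopA, hguard, pvSN, Finset.Icc_eq_empty_of_lt hNi]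
    · have hguard : ((i : Int) ≤ (N : Int)) := by exact_mod_cast hNi
      have hq1 : 1 ≤ N / i := by
        rw [Nat.one_le_div_iff (by omega)]; exact hNi
      have hij : i ≤ N / (N / i) := (pvDivSwap N i (N / i) hi hq1).mpr le_rfl
      have hjN : N / (N / i) ≤ N := Nat.div_le_self _ _
      have hconst : ∀ d, i ≤ d → d ≤ N / (N / i) → N / d = N / i := by
        intro d hd1 hd2
        have hle : N / d ≤ N / i := Nat.div_le_div_left hd1 (by omega)
        have hge : N / i ≤ N / d := (pvDivSwap N d (N / i) (by omega) hq1).mp hd2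
        omega
      have hstep : pvLoopA (fuel + 1) (N : Int) (i : Int) total =
          pvLoopA fuel (N : Int) (((N / (N / i) + 1 : Nat)) : Int)
            (total + ((N / i : Nat) : Int) * (pvXN (N / (N / i)) - pvXN (i - 1))) := by
        have e1 : PySem.Int.floordiv (N : Int) (i : Int) = ((N / i : Nat) : Int) :=
          PySem.Int.floordiv_natCast N i
        have e2 : PySem.Int.floordiv (N : Int) ((N / i : Nat) : Int) = ((N / (N / i) : Nat) : Int) :=
          PySem.Int.floordiv_natCast N (N / i)
        have e3 : ((i : Int) - 1) = ((i - 1 : Nat) : Int) := by push_cast [hi]; ring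
        have e4 : (((N / (N / i) : Nat)) : Int) + 1 = (((N / (N / i) + 1 : Nat)) : Int) := by
          push_cast; ring
        simp only [pvLoopA, if_pos hguard, e1, e2, e3, e4, pvChiPrefix_cast]
      rw [hstep, ih (N / (N / i) + 1) _ (by omega) (by omega)]
      have hblock : pvSN N i (N / (N / i)) = ((N / i : Nat) : Int) * (pvXN (N / (N / i)) - pvXN (i - 1)) :=
        pvConstBlock N i (N / (N / i)) (N / i) hi (by omega) hconst
      have hsplit : pvSN N i N = pvSN N i (N / (N / i)) + pvSN N (N / (N / i) + 1) N :=
        pvSN_split N i (N / (N / i)) N (by omega) hjN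
      rw [hsplit, hblock]; ring

theorem pvSqLoop_nonneg : ∀ (fuel : Nat) (n s : Int), 0 ≤ s → 0 ≤ pvSqLoop fuel n s := by
  intro fuel
  induction fuel with
  | zero => intro n s hs; simpa [pvSqLoop] using hs
  | succ fuel ih =>
    intro n s hs
    simp only [pvSqLoop]
    split
    · exact ih n (s + 1) (by omega)
    · exact hs

theorem pvChiN_cast (m : Nat) :
    (if (((m % 3 : Nat)) : Int) = 1 then (1 : Int)
     else if (((m % 3 : Nat)) : Int) = 2 then -1 else 0) = pvChiN m := by
  simp only [pvChiN]
  split_ifs <;> omega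

theorem pvFoldB1 (N : Nat) (m : Nat) :
    (PySem.List.pyRange 1 ((m : Int) + 1) 1).foldl
      (fun acc d =>
        acc + (if PySem.Int.mod d 3 = 1 then (1 : Int)
               else if PySem.Int.mod d 3 = 2 then -1 else 0) * PySem.Int.floordiv (N : Int) d) 0
    = pvSN N 1 m := by
  induction m with
  | zero =>
    simp [pvSN]
  | succ m ih =>
    have hr : PySem.List.pyRange 1 ((m : Int) + 1 + 1) 1 =
        PySem.List.pyRange 1 ((m : Int) + 1) 1 ++ [(m : Int) + 1] :=
      PySem.List.pyRange_one_succ_right (by omega)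
    have hc : (((m : Int) + 1)) = (((m + 1 : Nat)) : Int) := by push_cast; ring
    rw [show ((m + 1 : Nat) : Int) + 1 = (m : Int) + 1 + 1 by push_cast; ring, hr,
      List.foldl_append, ih]
    have hmod : PySem.Int.mod ((m : Int) + 1) 3 = (((m + 1) % 3 : Nat) : Int) := by
      rw [hc, show (3 : Int) = ((3 : Nat) : Int) from rfl, PySem.Int.mod_natCast]
    have hdiv : PySem.Int.floordiv (N : Int) ((m : Int) + 1) = ((N / (m + 1) : Nat) : Int) := by
      rw [hc, PySem.Int.floordiv_natCast]
    simp only [List.foldl_cons, List.foldl_nil, hmod, hdiv, pvChiN_cast]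
    show pvSN N 1 m + pvChiN (m + 1) * ((N / (m + 1) : Nat) : Int) = pvSN N 1 (m + 1)
    simp only [pvSN]
    rw [Finset.sum_Icc_succ_top (by omega : 1 ≤ m + 1)]

theorem pvFoldB2 (N : Nat) :
    ∀ (s : Nat) (total : Int),
      (PySem.List.pyRange 1 ((s : Int) + 1) 1).foldl
        (fun acc q =>
          acc + q * (pvX (PySem.Int.floordiv (N : Int) q) - pvX (PySem.Int.floordiv (N : Int) (q + 1)))) total
      = total + pvSN N (N / (s + 1) + 1) N := by
  intro s
  induction s with
  | zero =>
    intro total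
    have : N < N / 1 + 1 := by simp [Nat.div_one]
    simp [pvSN]
  | succ s ih =>
    intro total
    have hr : PySem.List.pyRange 1 ((s : Int) + 1 + 1) 1 =
        PySem.List.pyRange 1 ((s : Int) + 1) 1 ++ [(s : Int) + 1] :=
      PySem.List.pyRange_one_succ_right (by omega)
    rw [show ((s + 1 : Nat) : Int) + 1 = (s : Int) + 1 + 1 by push_cast; ring, hr,
      List.foldl_append, ih]
    have hd1 : PySem.Int.floordiv (N : Int) ((s : Int) + 1) = ((N / (s + 1) : Nat) : Int) := by
      rw [show ((s : Int) + 1) = (((s + 1 : Nat)) : Int) by push_cast; ring]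
      exact PySem.Int.floordiv_natCast N (s + 1)
    have hd2 : PySem.Int.floordiv (N : Int) ((s : Int) + 1 + 1) = ((N / (s + 2) : Nat) : Int) := by
      rw [show ((s : Int) + 1 + 1) = (((s + 2 : Nat)) : Int) by push_cast; ring]
      exact PySem.Int.floordiv_natCast N (s + 2)
    have hab : N / (s + 2) ≤ N / (s + 1) := Nat.div_le_div_left (by omega) (by omega)
    have hbN : N / (s + 1) ≤ N := Nat.div_le_self _ _
    have hconst : ∀ d, N / (s + 2) + 1 ≤ d → d ≤ N / (s + 1) → N / d = s + 1 := by
      intro d hdl hdr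
      have hd1' : 1 ≤ d := le_trans (Nat.succ_le_succ (Nat.zero_le _)) hdl
      have hge : s + 1 ≤ N / d :=
        (pvDivSwap N d (s + 1) hd1' (Nat.succ_le_succ (Nat.zero_le _))).mp hdr
      have hlt : N / d < s + 2 := by
        by_contra hcon
        have hcon' : s + 2 ≤ N / d := Nat.le_of_not_lt hcon
        have : d ≤ N / (s + 2) :=
          (pvDivSwap N (s + 2) d (Nat.succ_le_succ (Nat.zero_le _)) hd1').mp hcon'
        exact absurd (le_trans hdl this) (by simp)
      exact Nat.le_antisymm (Nat.lt_succ_iff.mp hlt) hge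
    have hblock : pvSN N (N / (s + 2) + 1) (N / (s + 1)) =
        ((s + 1 : Nat) : Int) * (pvXN (N / (s + 1)) - pvXN (N / (s + 2))) := by
      have := pvConstBlock N (N / (s + 2) + 1) (N / (s + 1)) (s + 1)
        (Nat.succ_le_succ (Nat.zero_le _))
        (by simp only [Nat.add_sub_cancel]; exact hab) hconst
      simpa using this
    have hsplit : pvSN N (N / (s + 2) + 1) N =
        pvSN N (N / (s + 2) + 1) (N / (s + 1)) + pvSN N (N / (s + 1) + 1) N :=
      pvSN_split N (N / (s + 2) + 1) (N / (s + 1)) N (Nat.succ_le_succ hab) hbN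
    simp only [List.foldl_cons, List.foldl_nil, hd1, hd2, pvX_cast]
    rw [hsplit, hblock]
    push_cast
    ring

-- ===== VERDICT (by name: the statement is the Claim_ definition above) =====
theorem count_hex_points_leq_py_spec : Claim_equal_count_hex_points_leq_py := by
  intro B cache _
  unfold Spec_count_hex_points_leq_py count_hex_points_leq_py count_hex_points_leq_py_alt
  by_cases hB : B ≤ 0
  · simp [hB]
  · have hB0 : 0 ≤ B := by omega
    lift B to Nat using hB0 with N
    have hN : 1 ≤ N := by omega
    simp only [if_neg hB]
    cases hget : (PySem.Dict.mk cache).get? (N : Int) with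
    | some hit => rfl
    | none =>
      simp only
      have hfuel : ((N : Int) + 1).toNat = N + 1 := by omega
      have hA : pvLoopA ((N : Int) + 1).toNat (N : Int) 1 0 = pvSN N 1 N := by
        rw [hfuel]
        have := pvLoopA_spec N (N + 1) 1 0 (by omega) (by omega)
        simpa using this
      obtain ⟨sN, hscast⟩ : ∃ sN : Nat, pvSqLoop ((N : Int) + 1).toNat (N : Int) 0 = (sN : Int) :=
        ⟨_, (Int.toNat_of_nonneg (pvSqLoop_nonneg _ _ _ (by omega))).symm⟩
      rw [hA, hscast]
      have hm : PySem.Int.floordiv (N : Int) ((sN : Int) + 1) = ((N / (sN + 1) : Nat) : Int) := by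
        rw [show ((sN : Int) + 1) = (((sN + 1 : Nat)) : Int) by push_cast; ring]
        exact PySem.Int.floordiv_natCast N (sN + 1)
      rw [hm, pvFoldB1 N (N / (sN + 1)), pvFoldB2 N sN]
      have hsplit : pvSN N 1 N = pvSN N 1 (N / (sN + 1)) + pvSN N (N / (sN + 1) + 1) N :=
        pvSN_split N 1 (N / (sN + 1)) N (Nat.succ_le_succ (Nat.zero_le _)) (Nat.div_le_self _ _)
      rw [hsplit]
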